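-- pv_equiv track=rewrite | github.com/lamng3/kroma | algorithms/bisimulation.py | bucket_by_rank
-- ===== SOURCE A (Python) =====
-- from collections import defaultdict, deque
-- from typing import Dict, Iterable, Any, Tuple, List, Set
--
-- def bucket_by_rank(
--     ranks: Dict[Any, int]
-- ) -> Tuple[Dict[int, Set[Any]], int]:
--     """
--     Group nodes into buckets by rank value.
--     Returns a dict rank->set(nodes) and the maximum rank.
--     """
--     buckets: Dict[int, Set[Any]] = defaultdict(set)
--     max_rank = 0
--     for node, r in ranks.items():
--         buckets[r].add(node)
--         if r > max_rank:
--             max_rank = r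
--     return buckets, max_rank
-- ===== SOURCE B (Python) =====
-- def bucket_by_rank(ranks):
--     """Sort-free regrouping: dedup the rank values once (first-occurrence order),
--     then build each bucket with a comprehension; max is a library max floored at 0."""
--     vals = list(ranks.values())
--     order = list(dict.fromkeys(vals))
--     buckets = {r: {node for node, rr in ranks.items() if rr == r} for r in order}
--     max_rank = max(max(vals), 0) if vals else 0
--     return buckets, max_rank
-- ===== Notes on version B (the rewrite author's own statement) =====
-- stated objective: alternative
-- what changed: Replaces A's single hash-accumulation loop (defaultdict of sets plus a running max) with a declarative regrouping: dedup the rank values once, build each bucket by a comprehension over the items, and take the maximum via the library max floored at 0.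
import Mathlib
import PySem

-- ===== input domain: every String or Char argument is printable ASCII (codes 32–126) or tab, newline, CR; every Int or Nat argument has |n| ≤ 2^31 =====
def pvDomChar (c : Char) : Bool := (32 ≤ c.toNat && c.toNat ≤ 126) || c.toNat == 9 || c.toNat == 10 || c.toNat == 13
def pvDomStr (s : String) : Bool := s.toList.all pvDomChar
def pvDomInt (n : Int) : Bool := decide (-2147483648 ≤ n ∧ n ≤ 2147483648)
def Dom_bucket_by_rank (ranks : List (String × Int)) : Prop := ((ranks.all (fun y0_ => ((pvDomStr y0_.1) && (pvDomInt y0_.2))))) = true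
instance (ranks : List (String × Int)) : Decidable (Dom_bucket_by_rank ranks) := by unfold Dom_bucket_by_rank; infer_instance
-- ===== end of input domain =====

-- B replaces A's single hash-accumulation loop with a dedup-then-comprehension regrouping
-- and a library max floored at 0 (objective: alternative decomposition, same results).


-- ===== PORT A =====
-- A: one pass; buckets[r].add(node) on a defaultdict(set), running max_rank starting at 0.
def bucket_by_rank (ranks : List (String × Int)) : (List (Int × List String)) × Int :=
  let st := ranks.foldl
    (fun (st : PySem.Dict Int (PySem.Set String) × Int) p =>
      (st.1.modify p.2 [] (fun s => PySem.Set.add s p.1),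
       if p.2 > st.2 then p.2 else st.2))
    (PySem.Dict.empty, 0)
  (st.1.items, st.2)

-- ===== PORT B =====
-- B: dedup the values once, one comprehension per distinct rank, library max floored at 0.
def bucket_by_rank_alt (ranks : List (String × Int)) : (List (Int × List String)) × Int :=
  let vals := ranks.map (·.2)
  let order := PySem.List.dedup vals
  let buckets := order.map (fun r =>
    (r, PySem.Set.ofList ((ranks.filter (fun p => p.2 == r)).map (·.1))))
  let mx := match PySem.List.max? vals (fun x => x) with
            | none => 0
            | some m => max m 0
  (buckets, mx)

-- ===== PRECONDITION & SPEC =====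
def Spec_bucket_by_rank (ranks : List (String × Int)) (out : (List (Int × List String)) × Int) : Prop := out = bucket_by_rank_alt ranks
instance (ranks : List (String × Int)) (out : (List (Int × List String)) × Int) : Decidable (Spec_bucket_by_rank ranks out) := by unfold Spec_bucket_by_rank; infer_instance

-- ===== CLAIM (what is proved, stated in full; the proofs are below) =====
def Claim_equal_bucket_by_rank : Prop := ∀ (ranks : List (String × Int)), Dom_bucket_by_rank ranks → Spec_bucket_by_rank ranks (bucket_by_rank ranks)

-- ===== LEMMAS AND PROOFS =====

-- A's single fold over a pair state splits into the dict fold and the max fold.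
theorem pvFoldSplit (l : List (String × Int)) (d : PySem.Dict Int (PySem.Set String)) (m : Int) :
    l.foldl
      (fun (st : PySem.Dict Int (PySem.Set String) × Int) p =>
        (st.1.modify p.2 [] (fun s => PySem.Set.add s p.1),
         if p.2 > st.2 then p.2 else st.2)) (d, m)
    = (l.foldl (fun d p => d.modify p.2 [] (fun s => PySem.Set.add s p.1)) d,
       l.foldl (fun m p => if p.2 > m then p.2 else m) m) := by
  induction l generalizing d m with
  | nil => rfl
  | cons p t ih => simp only [List.foldl_cons, ih]

-- The bucket accumulated for rank r by A's modify-loop is the filtered nodes folded into the start set.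
theorem pvGetDLoop (l : List (String × Int)) (d : PySem.Dict Int (PySem.Set String)) (r : Int) :
    (l.foldl (fun d p => d.modify p.2 [] (fun s => PySem.Set.add s p.1)) d).getD r []
    = PySem.Set.update (d.getD r []) ((l.filter (fun p => p.2 == r)).map (·.1)) := by
  induction l generalizing d with
  | nil => rfl
  | cons p t ih =>
    by_cases h : p.2 = r
    · subst h
      simp only [List.foldl_cons, List.filter_cons, BEq.rfl, ih,
        PySem.Dict.getD_modify_self]
      rfl
    · simp only [List.foldl_cons, List.filter_cons, ih,
        PySem.Dict.getD_modify_of_ne _ _ _ (fun hrp => h hrp.symm)]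
      simp [h]

-- the running-max step, named for the proofs below
def pvSt (m r : Int) : Int := if r > m then r else m

theorem pvStepIsMax (m r : Int) : pvSt m r = max m r := by
  unfold pvSt
  rcases le_or_gt r m with h | h
  · simp [not_lt.mpr h, max_eq_left h]
  · simp [h, max_eq_right h.le]

theorem pvStComm (t : List Int) (a b : Int) :
    t.foldl pvSt (pvSt a b) = pvSt a (t.foldl pvSt b) := by
  induction t generalizing b with
  | nil => rfl
  | cons x t ih =>
    simp only [List.foldl_cons]
    have h : pvSt (pvSt a b) x = pvSt a (pvSt b x) := by
      simp only [pvSt]; split_ifs <;> omega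
    rw [h, ih]

-- PySem.List.max? over a cons is the pvSt-fold from the head
theorem pvMax?Cons (t : List Int) (v : Int) :
    PySem.List.max? (v :: t) (fun x => x) = some (t.foldl pvSt v) := by
  induction t generalizing v with
  | nil => rfl
  | cons x t ih =>
    have h : PySem.List.max? (v :: x :: t) (fun x : Int => x)
        = PySem.List.max? (pvSt v x :: t) (fun x : Int => x) := by
      simp only [PySem.List.max?, List.foldl_cons, pvSt]
      by_cases hvx : v < x
      · simp [hvx]
      · simp [hvx]
    rw [h, ih, List.foldl_cons]

-- A's running max from 0 equals B's max?-based expression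
theorem pvMaxPart (vals : List Int) :
    vals.foldl pvSt 0
    = (match PySem.List.max? vals (fun x => x) with
       | none => 0
       | some m => max m 0) := by
  cases vals with
  | nil => rfl
  | cons v t =>
    rw [pvMax?Cons]
    show t.foldl pvSt (pvSt 0 v) = max (t.foldl pvSt v) 0
    rw [pvStComm, pvStepIsMax, max_comm]

theorem bucket_part (ranks : List (String × Int)) :
    (ranks.foldl (fun d p => d.modify p.2 [] (fun s => PySem.Set.add s p.1))
        (PySem.Dict.empty : PySem.Dict Int (PySem.Set String))).items
    = (PySem.List.dedup (ranks.map (·.2))).map (fun r =>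
        (r, PySem.Set.ofList ((ranks.filter (fun p => p.2 == r)).map (·.1)))) := by
  set D := ranks.foldl (fun d p => d.modify p.2 [] (fun s => PySem.Set.add s p.1))
      (PySem.Dict.empty : PySem.Dict Int (PySem.Set String)) with hD
  have hkeys : D.keys = PySem.Set.ofList (ranks.map (·.2)) := by
    have := PySem.Dict.keys_foldl_modify_key ranks (fun p => p.2) []
      (fun _ p => (fun s => PySem.Set.add s p.1))
      (PySem.Dict.empty : PySem.Dict Int (PySem.Set String))
    simpa [PySem.Dict.keys_empty, PySem.Set.update, PySem.Set.ofList] using this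
  have hnd : D.keys.Nodup := by
    exact PySem.Dict.nodup_keys_foldl_modify_key ranks (fun p => p.2) []
      (fun _ p => (fun s => PySem.Set.add s p.1)) _ PySem.Dict.nodup_keys_empty
  rw [PySem.Dict.items_eq_map_keys D hnd [], hkeys, ← PySem.List.dedup_eq_ofList]
  refine List.map_congr_left (fun r _ => ?_)
  have := pvGetDLoop ranks (PySem.Dict.empty : PySem.Dict Int (PySem.Set String)) r
  rw [hD, this]
  simp [PySem.Dict.getD_empty, PySem.Set.update, PySem.Set.ofList, PySem.Set.empty]

-- ===== VERDICT (by name: the statement is the Claim_ definition above) =====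
theorem bucket_by_rank_spec : Claim_equal_bucket_by_rank := by
  intro ranks _
  show bucket_by_rank ranks = bucket_by_rank_alt ranks
  unfold bucket_by_rank bucket_by_rank_alt
  rw [pvFoldSplit]
  refine Prod.ext ?_ ?_
  · exact bucket_part ranks
  · show ranks.foldl (fun m p => if p.2 > m then p.2 else m) 0 = _
    have h : ranks.foldl (fun m p => if p.2 > m then p.2 else m) 0
        = (ranks.map (·.2)).foldl pvSt 0 := by
      rw [List.foldl_map]; rfl
    rw [h, pvMaxPart]
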